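-- pv_equiv track=rewrite | github.com/ihorivliev/Tests | EE5.py | check_fractality
-- ===== SOURCE A (Python) =====
-- nodes = list(range(4))
--
-- def check_fractality(adj):
--     """Check if every node has a 'twin' with identical neighbor sets."""
--     # Precompute in/out neighbor sets
--     out_neighbors = {u: {v for v in nodes if adj[u][v]} for u in nodes}
--     in_neighbors  = {u: {v for v in nodes if adj[v][u]} for u in nodes}
--     for i in nodes:
--         found_twin = False
--         for j in nodes:
--             if i != j:
--                 if out_neighbors[i] == out_neighbors[j] and in_neighbors[i] == in_neighbors[j]:
--                     found_twin = True
--                     break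
--         if not found_twin:
--             return False
--     return True
-- ===== SOURCE B (Python) =====
-- nodes = list(range(4))
--
-- def check_fractality(adj):
--     """Group-by-signature: a node has a twin iff its (out,in)-neighbor
--     signature is shared by at least two nodes."""
--     sigs = [(frozenset(v for v in nodes if adj[u][v]),
--              frozenset(v for v in nodes if adj[v][u])) for u in nodes]
--     counts = {}
--     for s in sigs:
--         counts[s] = counts.get(s, 0) + 1
--     return all(counts[s] >= 2 for s in sigs)
-- ===== Notes on version B (the rewrite author's own statement) =====
-- stated objective: alternative
-- what changed: Replaces A's all-pairs nested twin search with a one-pass group-by: each node's (out-neighbors, in-neighbors) signature is counted in a dict, and a node has a twin iff its signature's count is at least 2.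
import Mathlib
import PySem

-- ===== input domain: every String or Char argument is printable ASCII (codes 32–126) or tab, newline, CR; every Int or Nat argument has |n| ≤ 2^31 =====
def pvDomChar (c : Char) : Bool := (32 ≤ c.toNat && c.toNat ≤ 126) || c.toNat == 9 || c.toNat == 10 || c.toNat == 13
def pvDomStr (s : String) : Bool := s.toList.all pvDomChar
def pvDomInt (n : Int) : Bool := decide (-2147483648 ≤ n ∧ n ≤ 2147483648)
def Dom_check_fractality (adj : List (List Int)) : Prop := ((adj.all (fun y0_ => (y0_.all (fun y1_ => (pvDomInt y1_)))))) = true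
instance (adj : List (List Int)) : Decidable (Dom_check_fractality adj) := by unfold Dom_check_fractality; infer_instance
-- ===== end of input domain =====

-- B replaces A's all-pairs twin search by a group-by-signature count (a dict keyed by
-- the (out-set, in-set) signature, built in one pass); same return value on Pre_.

-- nodes = list(range(4)) (module-level constant A closes over)
def pvNodes : List Int := [0, 1, 2, 3]

-- adj[u][v]; total form of the Python indexing, exact under Pre_ (indices in range)
def pvEntry (adj : List (List Int)) (u v : Int) : Int :=
  PySem.List.pyGetD (PySem.List.pyGetD adj u []) v 0

-- ===== PORT A =====
-- {v for v in nodes if adj[u][v]} / {v for v in nodes if adj[v][u]}: both comprehensions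
-- filter the same ordered duplicate-free list [0,1,2,3], so Python's set '==' on them
-- coincides with list equality of the filtered lists (exact here).
def pvOutN (adj : List (List Int)) (u : Int) : List Int :=
  pvNodes.filter (fun v => pvEntry adj u v ≠ 0)
def pvInN (adj : List (List Int)) (u : Int) : List Int :=
  pvNodes.filter (fun v => pvEntry adj v u ≠ 0)

-- for i in nodes: inner loop with break = any; 'if not found_twin: return False' = all
def check_fractality (adj : List (List Int)) : Bool :=
  pvNodes.all (fun i =>
    pvNodes.any (fun j =>
      i ≠ j && (pvOutN adj i == pvOutN adj j && pvInN adj i == pvInN adj j)))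

-- ===== PORT B =====
-- sigs = [(frozenset(...), frozenset(...)) for u in nodes]; the frozensets are again
-- filters of the ordered list [0,1,2,3], so their equality is list equality (exact here)
def pvSigs (adj : List (List Int)) : List (List Int × List Int) :=
  pvNodes.map (fun u =>
    (pvNodes.filter (fun v => pvEntry adj u v ≠ 0),
     pvNodes.filter (fun v => pvEntry adj v u ≠ 0)))

def check_fractality_alt (adj : List (List Int)) : Bool :=
  let sigs := pvSigs adj
  -- counts[s] = counts.get(s, 0) + 1
  let counts := sigs.foldl (fun d s => d.insert s (d.getD s 0 + 1))
    (PySem.Dict.empty : PySem.Dict (List Int × List Int) Int)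
  -- all(counts[s] >= 2 for s in sigs)
  sigs.all (fun s => 2 ≤ counts.getD s 0)

-- ===== PRECONDITION & SPEC =====
-- A evaluates adj[u][v] for all u,v in 0..3; it raises IndexError unless adj has at
-- least 4 rows and each of the first 4 rows has at least 4 entries.
def Pre_check_fractality (adj : List (List Int)) : Prop :=
  4 ≤ adj.length ∧ ∀ r ∈ adj.take 4, 4 ≤ r.length
instance (adj : List (List Int)) : Decidable (Pre_check_fractality adj) := by
  unfold Pre_check_fractality; infer_instance

def pvWitness_check_fractality : List (List Int) :=
  [[0, 1, 0, 0], [1, 0, 0, 0], [0, 0, 0, 1], [0, 0, 1, 0]]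

def Spec_check_fractality (adj : List (List Int)) (out : Bool) : Prop := out = check_fractality_alt adj
instance (adj : List (List Int)) (out : Bool) : Decidable (Spec_check_fractality adj out) := by unfold Spec_check_fractality; infer_instance

-- ===== CLAIM (what is proved, stated in full; the proofs are below) =====
def Claim_equal_check_fractality : Prop := ∀ (adj : List (List Int)), Dom_check_fractality adj → Pre_check_fractality adj → Spec_check_fractality adj (check_fractality adj)

-- ===== LEMMAS AND PROOFS =====

-- an element occurring at some position has count ≥ 2 iff it also occurs elsewhere
theorem pv_cnt_split {α : Type} [BEq α] [LawfulBEq α] (x : α) (pre post : List α) :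
    (2 ≤ (pre ++ x :: post).count x) ↔ (x ∈ pre ∨ x ∈ post) := by
  have h : (pre ++ x :: post).count x = pre.count x + post.count x + 1 := by
    simp [List.count_append]; omega
  rw [h]
  constructor
  · intro h2
    have h0 : 0 < pre.count x ∨ 0 < post.count x := by omega
    rcases h0 with h0 | h0
    · exact Or.inl (List.count_pos_iff.mp h0)
    · exact Or.inr (List.count_pos_iff.mp h0)
  · intro h
    rcases h with h | h <;> have := List.count_pos_iff.mpr h <;> omega

-- the four instantiations on a 4-element list (one per position of the element)
theorem pv_row0 {α : Type} [BEq α] [LawfulBEq α] (x0 x1 x2 x3 : α) :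
    (2 ≤ [x0, x1, x2, x3].count x0) ↔ (x0 = x1 ∨ x0 = x2 ∨ x0 = x3) := by
  simpa using pv_cnt_split x0 [] [x1, x2, x3]
theorem pv_row1 {α : Type} [BEq α] [LawfulBEq α] (x0 x1 x2 x3 : α) :
    (2 ≤ [x0, x1, x2, x3].count x1) ↔ (x1 = x0 ∨ x1 = x2 ∨ x1 = x3) := by
  simpa using pv_cnt_split x1 [x0] [x2, x3]
theorem pv_row2 {α : Type} [BEq α] [LawfulBEq α] (x0 x1 x2 x3 : α) :
    (2 ≤ [x0, x1, x2, x3].count x2) ↔ (x2 = x0 ∨ x2 = x1 ∨ x2 = x3) := by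
  simpa [or_assoc] using pv_cnt_split x2 [x0, x1] [x3]
theorem pv_row3 {α : Type} [BEq α] [LawfulBEq α] (x0 x1 x2 x3 : α) :
    (2 ≤ [x0, x1, x2, x3].count x3) ↔ (x3 = x0 ∨ x3 = x1 ∨ x3 = x2) := by
  simpa [or_assoc] using pv_cnt_split x3 [x0, x1, x2] []

-- ===== VERDICT (by name: the statement is the Claim_ definition above) =====
set_option maxHeartbeats 1000000 in
theorem check_fractality_spec : Claim_equal_check_fractality := by
  intro adj _ _
  unfold Spec_check_fractality
  have hsigs : pvSigs adj = [(pvOutN adj 0, pvInN adj 0), (pvOutN adj 1, pvInN adj 1),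
      (pvOutN adj 2, pvInN adj 2), (pvOutN adj 3, pvInN adj 3)] := by
    simp [pvSigs, pvNodes, pvOutN, pvInN]
  simp only [check_fractality_alt]
  rw [PySem.Dict.foldl_insert_getD_add_one_eq_counter]
  simp only [PySem.Dict.getD_counter, hsigs]
  simp only [check_fractality, pvNodes, List.all_cons, List.all_nil, List.any_cons,
    List.any_nil]
  rw [Bool.eq_iff_iff]
  simp only [Bool.and_eq_true, Bool.or_eq_true, Bool.and_true, Bool.or_false,
    beq_iff_eq, decide_eq_true_eq, ne_eq, Nat.ofNat_le_cast, pv_row0, pv_row1, pv_row2,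
    pv_row3, Prod.mk.injEq]
  norm_num
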